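-- pv_equiv track=rewrite | github.com/fbientrigo/radiationXlabs_notebooks | tests/test_cpld_decode.py | _expected_periodic_counts
-- ===== SOURCE A (Python) =====
-- from typing import Dict, Iterable, List, Sequence
--
-- def _expected_periodic_counts(
--     sequence: Sequence[Sequence[int]], n_bits: int = 16
-- ) -> List[List[int]]:
--     """Mirror the cadence detector used for the ``bitnP*`` columns."""
--
--     history = {bit: [] for bit in range(n_bits)}
--     periodic_totals = [0] * n_bits
--     traces = [[0] * len(sequence) for _ in range(n_bits)]
--     cumulative = [0] * n_bits
--     prev_state = [0] * n_bits
--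
--     for row_index, active_bits in enumerate(sequence):
--         current_state = [0] * n_bits
--         for bit in active_bits:
--             current_state[bit] = 1
--
--         for bit in range(n_bits):
--             if prev_state[bit] == 0 and current_state[bit] == 1:
--                 cumulative[bit] += 1
--
--             history[bit].append(cumulative[bit])
--             if len(history[bit]) >= 4:
--                 w = history[bit][-4:]
--                 if w[3] == w[2] + 1 and w[2] == w[1] and w[1] == w[0] + 1:
--                     periodic_totals[bit] += 1
--             history[bit] = history[bit][-4:]
--             traces[bit][row_index] = periodic_totals[bit]
--             prev_state[bit] = current_state[bit]
--
--     return traces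
-- ===== SOURCE B (Python) =====
-- from typing import List, Sequence
--
--
-- def _expected_periodic_counts(
--     sequence: Sequence[Sequence[int]], n_bits: int = 16
-- ) -> List[List[int]]:
--     """Two-phase rewrite: first collect per-bit rising-edge deltas, then scan
--     each bit's delta stream independently for the 1,0,1 cadence pattern."""
--
--     # Phase 1: per-bit rising-edge deltas, row by row.
--     deltas = [[] for _ in range(n_bits)]
--     prev = [0] * n_bits
--     for active_bits in sequence:
--         cur = [0] * n_bits
--         for bit in active_bits:
--             cur[bit] = 1
--         for b in range(n_bits):
--             deltas[b].append(1 if prev[b] == 0 and cur[b] == 1 else 0)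
--         prev = cur
--
--     # Phase 2: per-bit scan counting the cadence (delta pattern 1,0,1 ending
--     # at index r >= 3, mirroring the 4-wide cumulative window).
--     traces = []
--     for d in deltas:
--         total = 0
--         trace = []
--         d2 = d1 = None  # deltas two rows and one row back
--         r = 0
--         for x in d:
--             if r >= 3 and d2 == 1 and d1 == 0 and x == 1:
--                 total += 1
--             trace.append(total)
--             d2, d1, r = d1, x, r + 1
--         traces.append(trace)
--     return traces
-- ===== Notes on version B (the rewrite author's own statement) =====
-- stated objective: alternative
-- what changed: Replaced the fused per-row loop that maintains a 4-wide sliding window of cumulative rising-edge sums (trimmed with list slicing in a history dict) by a two-phase decomposition: first collect each bit's 0/1 rising-edge delta stream, then scan each stream once, counting the 1,0,1 delta pattern ending at index r >= 3 directly.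
import Mathlib
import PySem

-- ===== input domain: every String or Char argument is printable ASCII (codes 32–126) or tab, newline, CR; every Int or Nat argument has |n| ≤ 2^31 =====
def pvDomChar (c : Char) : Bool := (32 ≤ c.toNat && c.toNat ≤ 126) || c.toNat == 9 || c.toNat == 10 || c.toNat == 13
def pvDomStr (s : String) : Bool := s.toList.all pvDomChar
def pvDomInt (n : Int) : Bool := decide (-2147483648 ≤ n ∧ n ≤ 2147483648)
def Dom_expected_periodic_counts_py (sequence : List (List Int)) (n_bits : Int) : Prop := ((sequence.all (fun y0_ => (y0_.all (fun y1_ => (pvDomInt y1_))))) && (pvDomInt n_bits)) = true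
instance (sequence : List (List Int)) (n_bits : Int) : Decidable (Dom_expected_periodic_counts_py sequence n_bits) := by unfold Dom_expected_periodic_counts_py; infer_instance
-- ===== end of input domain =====

-- B replaces A's fused sliding-window-of-cumulative-sums loop by a two-phase rewrite:
-- collect per-bit rising-edge deltas, then scan each stream for the 1,0,1 pattern.


-- ===== PORT A =====

-- current_state[bit] = 1 : Python index assignment (negative index wraps; out-of-range
-- is IndexError = the `none` of pySet?, excluded by Pre_, where pySetD leaves cs unchanged)
def pvSetOne (cs : List Int) (bit : Int) : List Int := PySem.List.pySetD cs bit 1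

-- the inner `for bit in range(n_bits)` loop of A: walks the per-bit arrays
-- prev_state / current_state / cumulative / history / periodic_totals / traces in lockstep
-- (the history dict has keys exactly 0..n_bits-1, ported positionally; the write
-- traces[bit][row_index] fills each row left to right, ported as appending).
-- Returns (prev_state', cumulative', history', periodic_totals', traces').
def pvBitsA : List Int → List Int → List Int → List (List Int) → List Int → List (List Int) →
    List Int × List Int × List (List Int) × List Int × List (List Int)
  | p :: prev, c :: cur, cu :: cum, h :: hist, t :: tot, tr :: traces =>
    let cu' := if p = 0 ∧ c = 1 then cu + 1 else cu
    let h1 := h ++ [cu']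
    let t' :=
      if 4 ≤ h1.length then
        match PySem.List.slice h1 (some (-4)) none with   -- w = history[bit][-4:]
        | [w0, w1, w2, w3] => if w3 = w2 + 1 ∧ w2 = w1 ∧ w1 = w0 + 1 then t + 1 else t
        | _ => t
      else t
    let rest := pvBitsA prev cur cum hist tot traces
    (c :: rest.1, cu' :: rest.2.1, (PySem.List.slice h1 (some (-4)) none) :: rest.2.2.1,
      t' :: rest.2.2.2.1, (tr ++ [t']) :: rest.2.2.2.2)
  | _, _, _, _, _, _ => ([], [], [], [], [])

def expected_periodic_counts_py (sequence : List (List Int)) (n_bits : Int) : List (List Int) :=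
  let N := n_bits.toNat
  let st := sequence.foldl
    (fun (st : List Int × List Int × List (List Int) × List Int × List (List Int)) active_bits =>
      let cur := active_bits.foldl pvSetOne (List.replicate N 0)
      pvBitsA st.1 cur st.2.1 st.2.2.1 st.2.2.2.1 st.2.2.2.2)
    (List.replicate N 0, List.replicate N 0, List.replicate N ([] : List Int),
      List.replicate N 0, List.replicate N ([] : List Int))
  st.2.2.2.2

-- ===== PORT B =====

-- phase 1 inner loop: deltas[b].append(1 if prev[b] == 0 and cur[b] == 1 else 0), all b in lockstep
def pvAppendDeltas : List Int → List Int → List (List Int) → List (List Int)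
  | p :: prev, c :: cur, d :: deltas =>
    (d ++ [if p = 0 ∧ c = 1 then (1 : Int) else 0]) :: pvAppendDeltas prev cur deltas
  | _, _, _ => []

-- phase 2 loop body: state (total, trace, d2, d1, r)
def pvScanStep (st : Int × List Int × Option Int × Option Int × Int) (x : Int) :
    Int × List Int × Option Int × Option Int × Int :=
  let total := if 3 ≤ st.2.2.2.2 ∧ st.2.2.1 = some 1 ∧ st.2.2.2.1 = some 0 ∧ x = 1
    then st.1 + 1 else st.1
  (total, st.2.1 ++ [total], st.2.2.2.1, some x, st.2.2.2.2 + 1)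

def pvScanTrace (d : List Int) : List Int :=
  (d.foldl pvScanStep (0, [], none, none, 0)).2.1

def expected_periodic_counts_py_alt (sequence : List (List Int)) (n_bits : Int) : List (List Int) :=
  let N := n_bits.toNat
  let st := sequence.foldl
    (fun (st : List Int × List (List Int)) active_bits =>
      let cur := active_bits.foldl pvSetOne (List.replicate N 0)
      (cur, pvAppendDeltas st.1 cur st.2))
    (List.replicate N 0, List.replicate N ([] : List Int))
  st.2.map pvScanTrace

-- ===== PRECONDITION & SPEC =====

-- Pre_ excludes exactly the inputs on which Python A raises IndexError:
-- some bit in some row is outside the valid index range of the length-n_bits current_state.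
def Pre_expected_periodic_counts_py (sequence : List (List Int)) (n_bits : Int) : Prop :=
  ∀ row ∈ sequence, ∀ bit ∈ row, PySem.Raise.InRange n_bits.toNat bit
instance (sequence : List (List Int)) (n_bits : Int) : Decidable (Pre_expected_periodic_counts_py sequence n_bits) := by unfold Pre_expected_periodic_counts_py; infer_instance

def pvWitness_expected_periodic_counts_py : List (List Int) × Int := ([[0], [1], [0], [1], [0]], 2)

def Spec_expected_periodic_counts_py (sequence : List (List Int)) (n_bits : Int) (out : List (List Int)) : Prop := out = expected_periodic_counts_py_alt sequence n_bits
instance (sequence : List (List Int)) (n_bits : Int) (out : List (List Int)) : Decidable (Spec_expected_periodic_counts_py sequence n_bits out) := by unfold Spec_expected_periodic_counts_py; infer_instance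

-- ===== CLAIM (what is proved, stated in full; the proofs are below) =====
def Claim_equal_expected_periodic_counts_py : Prop := ∀ (sequence : List (List Int)) (n_bits : Int), Dom_expected_periodic_counts_py sequence n_bits → Pre_expected_periodic_counts_py sequence n_bits → Spec_expected_periodic_counts_py sequence n_bits (expected_periodic_counts_py sequence n_bits)

-- ===== LEMMAS AND PROOFS =====

-- per-bit state of A: (prev, cum, hist, tot, trace)
def pvStepA (s : Int × Int × List Int × Int × List Int) (c : Int) :
    Int × Int × List Int × Int × List Int :=
  let cu' := if s.1 = 0 ∧ c = 1 then s.2.1 + 1 else s.2.1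
  let h1 := s.2.2.1 ++ [cu']
  let t' :=
    if 4 ≤ h1.length then
      match PySem.List.slice h1 (some (-4)) none with
      | [w0, w1, w2, w3] => if w3 = w2 + 1 ∧ w2 = w1 ∧ w1 = w0 + 1 then s.2.2.2.1 + 1 else s.2.2.2.1
      | _ => s.2.2.2.1
    else s.2.2.2.1
  (c, cu', PySem.List.slice h1 (some (-4)) none, t', s.2.2.2.2 ++ [t'])

-- per-bit state of B's phase 1: (prev, deltas)
def pvStepB (s : Int × List Int) (c : Int) : Int × List Int :=
  (c, s.2 ++ [if s.1 = 0 ∧ c = 1 then (1 : Int) else 0])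

def pvCur (N : Nat) (row : List Int) : List Int := row.foldl pvSetOne (List.replicate N 0)

lemma pvFoldSet_length (row : List Int) : ∀ (cs : List Int), (row.foldl pvSetOne cs).length = cs.length := by
  induction row with
  | nil => intro cs; rfl
  | cons x xs ih => intro cs; simp [ih, pvSetOne, PySem.List.length_pySetD]

lemma pvBitsA_pack (S : List (Int × Int × List Int × Int × List Int)) (cur : List Int)
    (h : S.length = cur.length) :
    pvBitsA (S.map (·.1)) cur (S.map (·.2.1)) (S.map (·.2.2.1)) (S.map (·.2.2.2.1)) (S.map (·.2.2.2.2))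
      = ((List.zipWith pvStepA S cur).map (·.1), (List.zipWith pvStepA S cur).map (·.2.1),
         (List.zipWith pvStepA S cur).map (·.2.2.1), (List.zipWith pvStepA S cur).map (·.2.2.2.1),
         (List.zipWith pvStepA S cur).map (·.2.2.2.2)) := by
  induction S generalizing cur with
  | nil => cases cur <;> simp [pvBitsA]
  | cons s S ih =>
    cases cur with
    | nil => simp at h
    | cons c cur =>
      simp only [List.length_cons, Nat.add_right_cancel_iff] at h
      simp [pvBitsA, pvStepA, ih cur h]

lemma pvAppendDeltas_pack (S : List (Int × List Int)) (cur : List Int) (h : S.length = cur.length) :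
    pvAppendDeltas (S.map (·.1)) cur (S.map (·.2)) = (List.zipWith pvStepB S cur).map (·.2) := by
  induction S generalizing cur with
  | nil => cases cur <;> simp [pvAppendDeltas]
  | cons s S ih =>
    cases cur with
    | nil => simp at h
    | cons c cur =>
      simp only [List.length_cons, Nat.add_right_cancel_iff] at h
      simp [pvAppendDeltas, pvStepB, ih cur h]

lemma pvZipStepB_fst (S : List (Int × List Int)) (cur : List Int) (h : S.length = cur.length) :
    (List.zipWith pvStepB S cur).map (·.1) = cur := by
  induction S generalizing cur with
  | nil => cases cur <;> simp at h ⊢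
  | cons s S ih =>
    cases cur with
    | nil => simp at h
    | cons c cur =>
      simp only [List.length_cons, Nat.add_right_cancel_iff] at h
      simp [pvStepB, ih cur h]

-- A's outer fold in packed form
lemma pvFoldA_pack (N : Nat) (rows : List (List Int)) :
    ∀ (S : List (Int × Int × List Int × Int × List Int)), S.length = N →
    rows.foldl
      (fun (st : List Int × List Int × List (List Int) × List Int × List (List Int)) active_bits =>
        let cur := active_bits.foldl pvSetOne (List.replicate N 0)
        pvBitsA st.1 cur st.2.1 st.2.2.1 st.2.2.2.1 st.2.2.2.2)
      (S.map (·.1), S.map (·.2.1), S.map (·.2.2.1), S.map (·.2.2.2.1), S.map (·.2.2.2.2))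
    = (let S' := rows.foldl (fun S row => List.zipWith pvStepA S (pvCur N row)) S
       (S'.map (·.1), S'.map (·.2.1), S'.map (·.2.2.1), S'.map (·.2.2.2.1), S'.map (·.2.2.2.2))) := by
  induction rows with
  | nil => intro S hS; simp
  | cons row rows ih =>
    intro S hS
    have hcur : (pvCur N row).length = N := by simp [pvCur, pvFoldSet_length]
    have hzip : (List.zipWith pvStepA S (pvCur N row)).length = N := by
      simp [List.length_zipWith, hS, hcur]
    simp only [List.foldl_cons]
    rw [show (row.foldl pvSetOne (List.replicate N 0)) = pvCur N row from rfl,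
        pvBitsA_pack S (pvCur N row) (hS.trans hcur.symm)]
    exact ih _ hzip

-- B's phase-1 fold in packed form
lemma pvFoldB_pack (N : Nat) (rows : List (List Int)) :
    ∀ (S : List (Int × List Int)), S.length = N →
    rows.foldl
      (fun (st : List Int × List (List Int)) active_bits =>
        let cur := active_bits.foldl pvSetOne (List.replicate N 0)
        (cur, pvAppendDeltas st.1 cur st.2))
      (S.map (·.1), S.map (·.2))
    = (let S' := rows.foldl (fun S row => List.zipWith pvStepB S (pvCur N row)) S
       (S'.map (·.1), S'.map (·.2))) := by
  induction rows with
  | nil => intro S hS; rfl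
  | cons row rows ih =>
    intro S hS
    have hcur : (pvCur N row).length = N := by simp [pvCur, pvFoldSet_length]
    simp only [List.foldl_cons]
    rw [show (row.foldl pvSetOne (List.replicate N 0)) = pvCur N row from rfl,
        pvAppendDeltas_pack S (pvCur N row) (hS.trans hcur.symm),
        show ((pvCur N row, (List.zipWith pvStepB S (pvCur N row)).map (·.2)) :
            List Int × List (List Int))
          = ((List.zipWith pvStepB S (pvCur N row)).map (·.1),
             (List.zipWith pvStepB S (pvCur N row)).map (·.2)) from by
          rw [pvZipStepB_fst S (pvCur N row) (hS.trans hcur.symm)]]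
    exact ih (List.zipWith pvStepB S (pvCur N row)) (by simp [List.length_zipWith, hS, hcur])

-- loop interchange: a rowwise zipWith-fold is a per-bit fold
lemma pvFold_zipWith {σ : Type} (f : σ → Int → σ) (N : Nat) (rows : List (List Int)) :
    ∀ (S : List σ), S.length = N →
    (rows.foldl (fun S row => List.zipWith f S (pvCur N row)) S).length = N ∧
    ∀ (dflt : σ) (b : Nat), b < N →
      (rows.foldl (fun S row => List.zipWith f S (pvCur N row)) S).getD b dflt
        = rows.foldl (fun s row => f s ((pvCur N row).getD b 0)) (S.getD b dflt) := by
  induction rows with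
  | nil => intro S hS; exact ⟨hS, fun _ _ _ => rfl⟩
  | cons row rows ih =>
    intro S hS
    have hcur : (pvCur N row).length = N := by simp [pvCur, pvFoldSet_length]
    have hzip : (List.zipWith f S (pvCur N row)).length = N := by
      simp [List.length_zipWith, hS, hcur]
    obtain ⟨hlen, hget⟩ := ih (List.zipWith f S (pvCur N row)) hzip
    refine ⟨hlen, fun dflt b hb => ?_⟩
    simp only [List.foldl_cons]
    rw [hget dflt b hb]
    congr 1
    rw [List.getD_eq_getElem _ _ (by rw [hzip]; exact hb),
        List.getD_eq_getElem _ _ (by rw [hS]; exact hb),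
        List.getD_eq_getElem _ _ (by rw [hcur]; exact hb), List.getElem_zipWith]

-- the per-bit invariant tying A's fused state to B's delta stream and its scan state
def pvInv (sA : Int × Int × List Int × Int × List Int) (sB : Int × List Int) : Prop :=
  let k := sB.2.length
  let sc := sB.2.foldl pvScanStep (0, [], none, none, 0)
  sA.1 = sB.1 ∧ sA.2.2.2.1 = sc.1 ∧ sA.2.2.2.2 = sc.2.1 ∧ sc.2.2.2.2 = (k : Int) ∧
  ( (k = 0 ∧ sA.2.2.1 = [])
  ∨ (k = 1 ∧ ∃ a, sc.2.2.2.1 = some a ∧ sA.2.2.1 = [sA.2.1])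
  ∨ (k = 2 ∧ ∃ a, sc.2.2.2.1 = some a ∧ (∃ bb, sc.2.2.1 = some bb) ∧
       sA.2.2.1 = [sA.2.1 - a, sA.2.1])
  ∨ (3 ≤ k ∧ ∃ a, sc.2.2.2.1 = some a ∧ ∃ bb, sc.2.2.1 = some bb ∧
       ∃ pre : List Int, pre.length ≤ 1 ∧ sA.2.2.1 = pre ++ [sA.2.1 - a - bb, sA.2.1 - a, sA.2.1]))

lemma pvInv_step (sA : Int × Int × List Int × Int × List Int) (sB : Int × List Int) (c : Int)
    (h : pvInv sA sB) : pvInv (pvStepA sA c) (pvStepB sB c) := by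
  have hs : ∀ (l : List Int), PySem.List.slice l (some (-4)) none = l.drop (l.length - 4) :=
    fun l => PySem.List.slice_from_neg_ofNat l 4 (by omega)
  obtain ⟨hprev, htot, htr, hr, hcase⟩ := h
  rcases hcase with ⟨hk, hh⟩ | ⟨hk, a, ha, hh⟩ | ⟨hk, a, ha, ⟨bb, hbb⟩, hh⟩ |
    ⟨hk, a, ha, bb, hbb, pre, hpre, hh⟩
  · -- k = 0 : history empty, no window yet
    have hb2 : sB.2 = [] := by cases h2 : sB.2 <;> simp_all
    simp only [pvInv, pvStepA, pvStepB, hb2, hh, hprev, List.foldl_cons,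
      List.foldl_nil, pvScanStep, hs, List.nil_append, List.length_cons, List.length_nil] at *
    simp [htot, htr]
  · -- k = 1 : history = [cum]
    simp only [pvInv, pvStepA, pvStepB, hh, hprev, List.foldl_append, List.foldl_cons,
      List.foldl_nil, pvScanStep, hs, List.length_append, List.length_cons, List.length_nil] at *
    by_cases hc : sB.1 = 0 ∧ c = 1 <;> simp [htot, htr, hr, hk, ha, hc]
  · -- k = 2 : history = [cum - a, cum]
    simp only [pvInv, pvStepA, pvStepB, hh, hprev, List.foldl_append, List.foldl_cons,
      List.foldl_nil, pvScanStep, hs, List.length_append, List.length_cons, List.length_nil] at *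
    by_cases hc : sB.1 = 0 ∧ c = 1 <;> simp [htot, htr, hr, hk, ha, hbb, hc]
  · -- 3 ≤ k : history = pre ++ [cum - a - bb, cum - a, cum], the 4-window fires
    simp only [pvInv, pvStepA, pvStepB, hh, hprev, List.foldl_append, List.foldl_cons,
      List.foldl_nil, pvScanStep, hs, List.length_append, List.length_cons, List.length_nil] at *
    have e4 : pre.length + (0 + 1 + 1 + 1) + (0 + 1) - 4 = pre.length := by omega
    have hdrop : ∀ z : ℤ, List.drop pre.length
        (pre ++ [sA.2.1 - a - bb, sA.2.1 - a, sA.2.1] ++ [z])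
        = [sA.2.1 - a - bb, sA.2.1 - a, sA.2.1, z] := by
      intro z; rw [List.append_assoc, List.drop_left]; rfl
    have hk' : (3:ℤ) ≤ (sB.2.length : ℤ) := by exact_mod_cast hk
    have h4 : 4 ≤ pre.length + (0 + 1 + 1 + 1) + (0 + 1) := by omega
    by_cases hc : sB.1 = 0 ∧ c = 1 <;>
      simp [e4, h4, htot, htr, hr, ha, hbb, hk', hc]
    · refine ⟨?_, by omega, [sA.2.1 - a - bb], by simp, by simp⟩
      have hiff : (sA.2.1 = sA.2.1 - a ∧ sA.2.1 - a = sA.2.1 - a - bb + 1) ↔ (bb = 1 ∧ a = 0) := by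
        omega
      rw [if_congr hiff rfl rfl]
    · exact ⟨by omega, [sA.2.1 - a - bb], by simp, by simp⟩

lemma pvInv_fold {α : Type} (g : α → Int) (cs : List α) : ∀ sA sB, pvInv sA sB →
    pvInv (cs.foldl (fun s r => pvStepA s (g r)) sA) (cs.foldl (fun s r => pvStepB s (g r)) sB) := by
  induction cs with
  | nil => intro sA sB h; exact h
  | cons c cs ih => intro sA sB h; exact ih _ _ (pvInv_step sA sB (g c) h)

lemma pvInv_init : pvInv (0, 0, [], 0, []) (0, []) := by
  refine ⟨rfl, rfl, rfl, rfl, Or.inl ⟨rfl, rfl⟩⟩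

-- ===== VERDICT (by name: the statement is the Claim_ definition above) =====
theorem expected_periodic_counts_py_spec : Claim_equal_expected_periodic_counts_py := by
  intro sequence n_bits _ _
  show expected_periodic_counts_py sequence n_bits = expected_periodic_counts_py_alt sequence n_bits
  unfold expected_periodic_counts_py expected_periodic_counts_py_alt
  have hSA : (List.replicate n_bits.toNat
      ((0:Int), (0:Int), ([]:List Int), (0:Int), ([]:List Int))).length = n_bits.toNat := by simp
  have hSB : (List.replicate n_bits.toNat ((0:Int), ([]:List Int))).length = n_bits.toNat := by simp
  have hA := pvFoldA_pack n_bits.toNat sequence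
    (List.replicate n_bits.toNat (0, 0, [], 0, [])) hSA
  have hB := pvFoldB_pack n_bits.toNat sequence
    (List.replicate n_bits.toNat (0, [])) hSB
  simp only [List.map_replicate] at hA hB
  dsimp only at hA hB ⊢
  rw [hA, hB]
  simp only [List.map_map]
  obtain ⟨hlenA, hgetA⟩ := pvFold_zipWith pvStepA n_bits.toNat sequence
    (List.replicate n_bits.toNat (0, 0, [], 0, [])) hSA
  obtain ⟨hlenB, hgetB⟩ := pvFold_zipWith pvStepB n_bits.toNat sequence
    (List.replicate n_bits.toNat (0, [])) hSB
  apply List.ext_getElem (by simp [hlenA, hlenB])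
  intro b hb1 hb2
  have hbN : b < n_bits.toNat := by simpa [hlenA] using hb1
  simp only [List.getElem_map, Function.comp_apply]
  rw [← List.getD_eq_getElem _ ((0:Int), (0:Int), ([]:List Int), (0:Int), ([]:List Int))
        (by rw [hlenA]; exact hbN),
      ← List.getD_eq_getElem _ ((0:Int), ([]:List Int)) (by rw [hlenB]; exact hbN),
      hgetA _ b hbN, hgetB _ b hbN]
  have hrepA : (List.replicate n_bits.toNat
      ((0:Int), (0:Int), ([]:List Int), (0:Int), ([]:List Int))).getD b
      (0, 0, [], 0, []) = (0, 0, [], 0, []) := by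
    rw [List.getD_eq_getElem _ _ (by simpa using hbN)]; simp
  have hrepB : (List.replicate n_bits.toNat ((0:Int), ([]:List Int))).getD b (0, []) = (0, []) := by
    rw [List.getD_eq_getElem _ _ (by simpa using hbN)]; simp
  rw [hrepA, hrepB]
  obtain ⟨-, -, htr, -, -⟩ := pvInv_fold
    (fun row => (pvCur n_bits.toNat row).getD b 0) sequence _ _ pvInv_init
  exact htr
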